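-- pv_equiv track=rewrite | github.com/sandrofsousa/PTN | sharing_code.py | create_edge_list
-- ===== SOURCE A (Python) =====
-- def create_edge_list(times_list):
--     """
--     Function to create edge list from stop_times file with new IDs, taking the first stop of sequence
--     and saving the next stop as its successor for any line where the trip is the same.
--     """
--     edge_list = []
--     for row in range(0, len(times_list) - 1):  # Start index at 0 and finish at last line from list
--         trip1 = times_list[row][0]
--         stop1 = times_list[row][1]
--         trip2 = times_list[row + 1][0]   # Get trip_id from next line
--         stop2 = times_list[row + 1][1]   # Get stop_id from next line
--         if trip1 == trip2:  # Create a link only if the stops are in the same line sequence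
--             edge_list.append((str(stop1), str(stop2), str(trip1)))
--     return edge_list
-- ===== SOURCE B (Python) =====
-- def create_edge_list(times_list):
--     """
--     Group-then-pair re-implementation: find each maximal run of consecutive rows
--     sharing the same trip id, then emit an edge for every adjacent pair inside the run.
--     """
--     if len(times_list) < 2:     # no adjacent pair exists, nothing to build
--         return []
--     edge_list = []
--     i, n = 0, len(times_list)
--     while i < n:
--         trip = times_list[i][0]
--         j = i + 1
--         while j < n and times_list[j][0] == trip:   # collect the run of this trip
--             j += 1
--         run = times_list[i:j]
--         for r1, r2 in zip(run, run[1:]):            # edges within the run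
--             edge_list.append((str(r1[1]), str(r2[1]), str(trip)))
--         i = j
--     return edge_list
-- ===== Notes on version B (the rewrite author's own statement) =====
-- stated objective: alternative
-- what changed: A does one flat scan over adjacent index pairs comparing trip ids; B first finds each maximal run of consecutive rows with the same trip id and then pairs adjacent rows within the run (group-then-pair decomposition).
import Mathlib
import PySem

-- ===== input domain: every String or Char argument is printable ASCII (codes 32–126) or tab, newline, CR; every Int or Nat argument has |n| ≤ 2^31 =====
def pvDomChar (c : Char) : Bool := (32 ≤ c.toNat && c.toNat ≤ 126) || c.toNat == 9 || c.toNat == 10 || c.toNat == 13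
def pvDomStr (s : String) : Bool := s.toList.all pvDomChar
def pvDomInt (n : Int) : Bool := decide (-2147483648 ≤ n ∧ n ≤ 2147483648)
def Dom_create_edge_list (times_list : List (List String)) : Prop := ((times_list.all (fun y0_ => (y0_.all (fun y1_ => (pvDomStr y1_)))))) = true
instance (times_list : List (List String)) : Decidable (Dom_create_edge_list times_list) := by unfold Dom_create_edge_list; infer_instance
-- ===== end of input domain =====

-- B replaces A's flat adjacent-pair scan with a group-then-pair decomposition (same output, similar cost).
-- Rows are Python str values already, so A's str() conversions are identities and are ported as such.

-- ===== PORT A =====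
-- Literal port of A: fold over range(0, len-1); indexing ported with pyGetD (exact under Pre_, where all accesses are in range).
def create_edge_list (times_list : List (List String)) : List (String × String × String) :=
  (PySem.List.pyRange 0 ((times_list.length : Int) - 1) 1).foldl
    (fun edge_list row =>
      let trip1 := PySem.List.pyGetD (PySem.List.pyGetD times_list row []) 0 ""
      let stop1 := PySem.List.pyGetD (PySem.List.pyGetD times_list row []) 1 ""
      let trip2 := PySem.List.pyGetD (PySem.List.pyGetD times_list (row + 1) []) 0 ""
      let stop2 := PySem.List.pyGetD (PySem.List.pyGetD times_list (row + 1) []) 1 ""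
      if trip1 == trip2 then edge_list ++ [(stop1, stop2, trip1)] else edge_list)
    []

-- ===== PORT B =====
def pvKey (r : List String) : String := PySem.List.pyGetD r 0 ""    -- row[0] (trip id)
def pvStop (r : List String) : String := PySem.List.pyGetD r 1 ""   -- row[1] (stop id)

-- inner while loop of B: collect the maximal prefix of rows whose trip id equals k; returns (run-tail, remainder)
def pvTakeRun (k : String) : List (List String) → List (List String) × List (List String)
  | [] => ([], [])
  | r :: rest =>
    if pvKey r == k then
      let p := pvTakeRun k rest
      (r :: p.1, p.2)
    else ([], r :: rest)

theorem pvTakeRun_rem_le (k : String) (l : List (List String)) : (pvTakeRun k l).2.length ≤ l.length := by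
  induction l with
  | nil => simp [pvTakeRun]
  | cons r rest ih =>
    simp only [pvTakeRun]
    split
    · exact Nat.le_succ_of_le ih
    · simp

-- zip(run, run[1:]) edges of one run
def pvPairs (k : String) (rows : List (List String)) : List (String × String × String) :=
  (rows.zip rows.tail).map (fun p => (pvStop p.1, pvStop p.2, k))

-- outer while loop of B: one run at a time
def pvLoop : List (List String) → List (String × String × String)
  | [] => []
  | r :: rest =>
    pvPairs (pvKey r) (r :: (pvTakeRun (pvKey r) rest).1) ++ pvLoop (pvTakeRun (pvKey r) rest).2
termination_by l => l.length
decreasing_by exact Nat.lt_succ_of_le (pvTakeRun_rem_le _ rest)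

def create_edge_list_alt (times_list : List (List String)) : List (String × String × String) :=
  if times_list.length < 2 then [] else pvLoop times_list

-- ===== PRECONDITION & SPEC =====
-- Pre_ excludes exactly the inputs on which Python A raises IndexError: a list of at least 2 rows
-- containing a row shorter than 2 (A reads row[0] and row[1] of every row then).
def Pre_create_edge_list (times_list : List (List String)) : Prop :=
  2 ≤ times_list.length → ∀ r ∈ times_list, 2 ≤ r.length
instance (times_list : List (List String)) : Decidable (Pre_create_edge_list times_list) := by unfold Pre_create_edge_list; infer_instance

def pvWitness_create_edge_list : List (List String) := [["t", "1"], ["t", "2"], ["u", "3"]]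

def Spec_create_edge_list (times_list : List (List String)) (out : List (String × String × String)) : Prop := out = create_edge_list_alt times_list
instance (times_list : List (List String)) (out : List (String × String × String)) : Decidable (Spec_create_edge_list times_list out) := by unfold Spec_create_edge_list; infer_instance

-- ===== CLAIM (what is proved, stated in full; the proofs are below) =====
def Claim_equal_create_edge_list : Prop := ∀ (times_list : List (List String)), Dom_create_edge_list times_list → Pre_create_edge_list times_list → Spec_create_edge_list times_list (create_edge_list times_list)

-- ===== LEMMAS AND PROOFS =====

-- common specification: edges between adjacent rows with equal trip ids
def pvAdj : List (List String) → List (String × String × String)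
  | r1 :: r2 :: rest =>
    (if pvKey r1 == pvKey r2 then [(pvStop r1, pvStop r2, pvKey r1)] else []) ++ pvAdj (r2 :: rest)
  | _ => []

def pvStepN (tl : List (List String)) (edge_list : List (String × String × String)) (k : Nat) :
    List (String × String × String) :=
  if pvKey (tl.getD k []) == pvKey (tl.getD (k + 1) []) then
    edge_list ++ [(pvStop (tl.getD k []), pvStop (tl.getD (k + 1) []), pvKey (tl.getD k []))]
  else edge_list

theorem pvFoldA (times_list : List (List String)) :
    ∀ acc : List (String × String × String),
    (List.range (times_list.length - 1)).foldl (pvStepN times_list) acc = acc ++ pvAdj times_list := by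
  induction times_list using pvAdj.induct with
  | case1 r1 r2 rest ih =>
    intro acc
    have hlen : (r1 :: r2 :: rest).length - 1 = rest.length + 1 := by simp
    rw [hlen, List.range_succ_eq_map, List.foldl_cons, List.foldl_map]
    have hcong : (List.range rest.length).foldl
        (fun acc' k => pvStepN (r1 :: r2 :: rest) acc' (Nat.succ k))
        (pvStepN (r1 :: r2 :: rest) acc 0)
        = (List.range rest.length).foldl (pvStepN (r2 :: rest))
            (pvStepN (r1 :: r2 :: rest) acc 0) := by
      apply PySem.List.foldl_congr_mem
      intro acc' k _
      simp [pvStepN, List.getD]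
    rw [hcong]
    have hlen2 : (r2 :: rest).length - 1 = rest.length := by simp
    rw [← hlen2, ih]
    by_cases h : pvKey r1 == pvKey r2 <;>
      simp [pvStepN, pvAdj, List.getD, h]
  | case2 tl h =>
    intro acc
    rcases tl with _ | ⟨a, _ | ⟨b, t⟩⟩
    · simp [pvAdj]
    · simp [pvAdj]
    · exact absurd rfl (h a b t)

theorem pvA_eq_adj (times_list : List (List String)) :
    create_edge_list times_list = pvAdj times_list := by
  unfold create_edge_list
  rw [PySem.List.pyRange_one]
  have h1 : ((times_list.length : Int) - 1 - 0).toNat = times_list.length - 1 := by omega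
  rw [h1, List.foldl_map]
  have key := pvFoldA times_list []
  simp only [List.nil_append] at key
  rw [← key]
  apply PySem.List.foldl_congr_mem
  intro acc k _
  have hk0 : (0 : Int) + (k : Int) = ((k : Nat) : Int) := by omega
  have hk1 : ((k : Int) + 1) = (((k + 1 : Nat)) : Int) := by push_cast; ring
  simp only [hk0, hk1, PySem.List.pyGetD_natCast, pvStepN, pvKey, pvStop]

theorem pvRun_adj : ∀ (rest : List (List String)) (r : List String),
    pvPairs (pvKey r) (r :: (pvTakeRun (pvKey r) rest).1) ++ pvAdj (pvTakeRun (pvKey r) rest).2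
    = pvAdj (r :: rest) := by
  intro rest
  induction rest with
  | nil => intro r; simp [pvTakeRun, pvPairs, pvAdj]
  | cons b rest' ih =>
    intro r
    by_cases h : (pvKey b == pvKey r) = true
    · have heq : pvKey b = pvKey r := eq_of_beq h
      have ht : pvTakeRun (pvKey r) (b :: rest')
          = (b :: (pvTakeRun (pvKey r) rest').1, (pvTakeRun (pvKey r) rest').2) := by
        simp [pvTakeRun, h]
      rw [ht]
      have hpair : pvPairs (pvKey r) (r :: b :: (pvTakeRun (pvKey r) rest').1)
          = (pvStop r, pvStop b, pvKey r) :: pvPairs (pvKey r) (b :: (pvTakeRun (pvKey r) rest').1) := by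
        simp [pvPairs]
      rw [hpair]
      have ihb := ih b
      rw [heq] at ihb
      have htrue : (pvKey r == pvKey b) = true := by simp [heq]
      have hadj : pvAdj (r :: b :: rest')
          = (pvStop r, pvStop b, pvKey r) :: pvAdj (b :: rest') := by
        simp [pvAdj, htrue]
      rw [hadj, List.cons_append, ihb]
    · have hne : (pvKey r == pvKey b) = false := by
        apply beq_eq_false_iff_ne.mpr
        intro he
        exact h (by simp [he])
      have ht : pvTakeRun (pvKey r) (b :: rest') = ([], b :: rest') := by
        simp [pvTakeRun, h]
      rw [ht]
      simp [pvPairs, pvAdj, hne]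

theorem pvB_eq_adj (times_list : List (List String)) :
    create_edge_list_alt times_list = pvAdj times_list := by
  unfold create_edge_list_alt
  by_cases hlen : times_list.length < 2
  · rcases times_list with _ | ⟨a, _ | ⟨b, t⟩⟩
    · simp [pvAdj]
    · simp [pvAdj]
    · simp at hlen
  · simp only [hlen, if_false]
    induction times_list using pvLoop.induct with
    | case1 => simp [pvLoop, pvAdj]
    | case2 r rest ih =>
      rw [pvLoop]
      rcases Nat.lt_or_ge (pvTakeRun (pvKey r) rest).2.length 2 with h2 | h2
      · -- remainder short: pvLoop on it equals pvAdj on it directly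
        have : pvLoop (pvTakeRun (pvKey r) rest).2 = pvAdj (pvTakeRun (pvKey r) rest).2 := by
          rcases hrem : (pvTakeRun (pvKey r) rest).2 with _ | ⟨a, _ | ⟨b, t⟩⟩
          · simp [pvLoop, pvAdj]
          · simp [pvLoop, pvTakeRun, pvPairs, pvAdj]
          · rw [hrem] at h2; simp at h2
        rw [this]; exact pvRun_adj rest r
      · rw [ih (by omega)]; exact pvRun_adj rest r

-- ===== VERDICT (by name: the statement is the Claim_ definition above) =====
theorem create_edge_list_spec : Claim_equal_create_edge_list := by
  intro times_list _ _
  unfold Spec_create_edge_list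
  rw [pvA_eq_adj, pvB_eq_adj]
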